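-- pv_equiv track=rewrite | github.com/hamnaasif263-lang/TeleGeno-AI-Dashboard | telemedicine_dashboard.py | analyze_snps
-- ===== SOURCE A (Python) =====
-- from typing import Dict, Tuple
--
-- SNP_EFFECTS = {
--     "CYP2C19": {
--         "rs4244285": {"AA": "Poor", "AG": "Intermediate", "GG": "Normal"},
--         "Metabolite_Impact": {
--             "Poor": "Consider alternative medication",
--             "Intermediate": "Monitor closely",
--             "Normal": "Standard dosing"
--         }
--     },
--     "APOE": {
--         "rs429358": {"AA": "Low Risk", "AG": "Medium Risk", "GG": "High Risk"},
--         "Risk_Impact": {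
--             "Low Risk": "No specific action needed",
--             "Medium Risk": "Regular monitoring advised",
--             "High Risk": "Intensive monitoring required"
--         }
--     }
-- }
--
-- def analyze_snps(snps: Dict[str, str]) -> Tuple[list, dict]:
--     results = []
--     status = {gene: "Unknown" for gene in SNP_EFFECTS.keys()}
--     severity_order = ["Unknown", "Low Risk", "Normal", "Medium Risk", "Intermediate", "High Risk", "Poor"]
--     for gene, mapping in SNP_EFFECTS.items():
--         gene_effects = []
--         for snp_id, genotype_map in mapping.items():
--             if snp_id in ("Metabolite_Impact", "Risk_Impact"):
--                 continue
--             if snp_id in snps: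
--                 genotype = snps[snp_id]
--                 effect = genotype_map.get(genotype, "Unknown")
--                 results.append({
--                     "Gene": gene,
--                     "SNP ID": snp_id,
--                     "Genotype": genotype,
--                     "Effect": effect
--                 })
--                 gene_effects.append(effect)
--         if gene_effects:
--             worst = max(gene_effects, key=lambda e: severity_order.index(e) if e in severity_order else 0)
--             status[gene] = worst
--     return results, status
-- ===== SOURCE B (Python) =====
-- SEVERITY_ORDER = ["Unknown", "Low Risk", "Normal", "Medium Risk", "Intermediate", "High Risk", "Poor"]
--
-- SNP_TABLE = [
--     ("CYP2C19", "rs4244285", {"AA": "Poor", "AG": "Intermediate", "GG": "Normal"}),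
--     ("APOE", "rs429358", {"AA": "Low Risk", "AG": "Medium Risk", "GG": "High Risk"}),
-- ]
--
-- def _severity(e):
--     return SEVERITY_ORDER.index(e) if e in SEVERITY_ORDER else 0
--
-- def analyze_snps(snps):
--     # pass 1: build the full results list from the flat SNP table
--     results = [
--         {"Gene": gene, "SNP ID": snp_id, "Genotype": snps[snp_id],
--          "Effect": gmap.get(snps[snp_id], "Unknown")}
--         for gene, snp_id, gmap in SNP_TABLE if snp_id in snps
--     ]
--     # pass 2: per-gene worst severity over the already-built results
--     status = {}
--     for gene, _, _ in SNP_TABLE: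
--         effects = [r["Effect"] for r in results if r["Gene"] == gene]
--         status[gene] = max(effects, key=_severity) if effects else "Unknown"
--     return results, status
-- ===== Notes on version B (the rewrite author's own statement) =====
-- stated objective: alternative
-- what changed: A interleaves result-building and per-gene worst-severity aggregation inside a nested loop over the nested SNP_EFFECTS dict; B makes one flat pass over a flat (gene, snp, map) table to build the results list, then a separate grouping pass over the built results to compute each gene's status.
import Mathlib
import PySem

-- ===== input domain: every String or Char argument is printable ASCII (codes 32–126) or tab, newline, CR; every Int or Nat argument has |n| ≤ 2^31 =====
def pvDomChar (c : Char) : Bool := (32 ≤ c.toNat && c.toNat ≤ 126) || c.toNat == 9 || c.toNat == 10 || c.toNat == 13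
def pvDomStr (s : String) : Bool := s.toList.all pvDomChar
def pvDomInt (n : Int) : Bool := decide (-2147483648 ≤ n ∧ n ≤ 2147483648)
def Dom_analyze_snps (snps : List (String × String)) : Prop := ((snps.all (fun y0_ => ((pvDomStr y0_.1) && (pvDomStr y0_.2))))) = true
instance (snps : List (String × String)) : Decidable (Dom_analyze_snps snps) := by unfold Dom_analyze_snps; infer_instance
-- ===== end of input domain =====

-- B splits A's interleaved per-gene accumulate-and-aggregate loop into two flat passes over a
-- flat (gene, snp, genotype-map) table: build the results list first, then compute per-gene worst
-- severity by grouping the built results (objective: alternative decomposition, same cost).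


-- ===== PORT A =====
-- the module constant SNP_EFFECTS, as nested association structure
def pvSnpEffects : List (String × List (String × PySem.Dict String String)) := [
  ("CYP2C19", [("rs4244285", PySem.Dict.mk [("AA","Poor"),("AG","Intermediate"),("GG","Normal")]),
               ("Metabolite_Impact", PySem.Dict.mk [("Poor","Consider alternative medication"),
                 ("Intermediate","Monitor closely"),("Normal","Standard dosing")])]),
  ("APOE", [("rs429358", PySem.Dict.mk [("AA","Low Risk"),("AG","Medium Risk"),("GG","High Risk")]),
            ("Risk_Impact", PySem.Dict.mk [("Low Risk","No specific action needed"),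
              ("Medium Risk","Regular monitoring advised"),("High Risk","Intensive monitoring required")])])]

def pvSeverityOrder : List String :=
  ["Unknown", "Low Risk", "Normal", "Medium Risk", "Intermediate", "High Risk", "Poor"]

-- lambda e: severity_order.index(e) if e in severity_order else 0
def pvSevKey (e : String) : Nat :=
  match PySem.List.index? pvSeverityOrder e with
  | some i => i
  | none => 0

-- Python's max(xs, key=k): none on [], else the FIRST element of maximal key
def pyMaxBySev : List String → Option String
  | [] => none
  | x :: xs => some (xs.foldl (fun best e => if pvSevKey best < pvSevKey e then e else best) x)

def analyze_snps (snps : List (String × String)) :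
    (List (List (String × String))) × (List (String × String)) :=
  let d := PySem.Dict.ofList snps          -- the dict argument, built from the pairs
  let status0 : PySem.Dict String String :=
    pvSnpEffects.foldl (fun st g => st.insert g.1 "Unknown") PySem.Dict.empty
  let fin := pvSnpEffects.foldl (fun (acc : List (List (String × String)) × PySem.Dict String String) gm =>
      let gene := gm.1
      -- inner loop over mapping.items(): (results, gene_effects)
      let inner := gm.2.foldl (fun (st : List (List (String × String)) × List String) sm =>
          if sm.1 = "Metabolite_Impact" ∨ sm.1 = "Risk_Impact" then st
          else
            match d.get? sm.1 with         -- 'if snp_id in snps: genotype = snps[snp_id]'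
            | some genotype =>
                let effect := sm.2.getD genotype "Unknown"
                (st.1 ++ [[("Gene", gene), ("SNP ID", sm.1), ("Genotype", genotype), ("Effect", effect)]],
                 st.2 ++ [effect])
            | none => st) (acc.1, ([] : List String))
      let status := match pyMaxBySev inner.2 with
        | some worst => acc.2.insert gene worst
        | none => acc.2
      (inner.1, status)) (([] : List (List (String × String))), status0)
  (fin.1, fin.2.items)

-- ===== PORT B =====
-- the flat table B iterates over
def pvSnpTable : List (String × String × PySem.Dict String String) := [
  ("CYP2C19", "rs4244285", PySem.Dict.mk [("AA","Poor"),("AG","Intermediate"),("GG","Normal")]),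
  ("APOE", "rs429358", PySem.Dict.mk [("AA","Low Risk"),("AG","Medium Risk"),("GG","High Risk")])]

def analyze_snps_alt (snps : List (String × String)) :
    (List (List (String × String))) × (List (String × String)) :=
  let d := PySem.Dict.ofList snps
  -- pass 1: the results comprehension over the flat table
  let results := pvSnpTable.foldl (fun acc t =>
      match d.get? t.2.1 with
      | some g => acc ++ [[("Gene", t.1), ("SNP ID", t.2.1), ("Genotype", g),
                           ("Effect", t.2.2.getD g "Unknown")]]
      | none => acc) ([] : List (List (String × String)))
  -- pass 2: per-gene worst severity over the built results
  let status := pvSnpTable.foldl (fun (st : PySem.Dict String String) t =>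
      let effects := (results.filter (fun r => ((PySem.Dict.mk r).get? "Gene").getD "" = t.1)).map
                       (fun r => ((PySem.Dict.mk r).get? "Effect").getD "")
      st.insert t.1 (if effects.isEmpty then "Unknown" else PySem.List.maxD effects pvSevKey "Unknown"))
    PySem.Dict.empty
  (results, status.items)

-- ===== PRECONDITION & SPEC =====
def Spec_analyze_snps (snps : List (String × String)) (out : (List (List (String × String))) × (List (String × String))) : Prop := out = analyze_snps_alt snps
instance (snps : List (String × String)) (out : (List (List (String × String))) × (List (String × String))) : Decidable (Spec_analyze_snps snps out) := by unfold Spec_analyze_snps; infer_instance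

-- ===== CLAIM (what is proved, stated in full; the proofs are below) =====
def Claim_equal_analyze_snps : Prop := ∀ (snps : List (String × String)), Dom_analyze_snps snps → Spec_analyze_snps snps (analyze_snps snps)

-- ===== LEMMAS AND PROOFS =====

-- ===== VERDICT (by name: the statement is the Claim_ definition above) =====
theorem analyze_snps_spec : Claim_equal_analyze_snps := by
  intro snps _
  unfold Spec_analyze_snps analyze_snps analyze_snps_alt
  cases h1 : (PySem.Dict.ofList snps).get? "rs4244285" <;>
    cases h2 : (PySem.Dict.ofList snps).get? "rs429358" <;>
      simp [pvSnpEffects, pvSnpTable, h1, h2, pyMaxBySev, PySem.List.maxD, PySem.List.max?,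
            PySem.Dict.get?_mk_cons, PySem.Dict.empty, PySem.Dict.insert,
            PySem.Dict.contains]
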